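-- pv_equiv track=rewrite | github.com/aryanzandi123/yeeeZAAA | utils/interaction_metadata_generator.py | determine_interaction_arrow
-- ===== SOURCE A (Python) =====
-- from typing import Any, Dict, List, Optional, Set
--
-- def determine_interaction_arrow(functions: List[Dict[str, Any]]) -> str:
--     """
--     Determine interaction-level arrow based on ALL function-level arrows.
--
--     Logic:
--     - If ALL functions activate: return "activates"
--     - If ALL functions inhibit: return "inhibits"
--     - If MIXED (some activate, some inhibit): return "regulates" or "modulates"
--     - If only binding/no clear direction: return "binds"
--
--     Args:
--         functions: List of function dictionaries
--
--     Returns: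
--         str: The determined arrow type ("activates", "inhibits", "regulates", or "binds")
--     """
--     if not functions:
--         return "binds"
--
--     arrows = [f.get("arrow", "").lower() for f in functions if f.get("arrow")]
--
--     if not arrows:
--         return "binds"
--
--     # Count arrow types
--     activates_count = sum(1 for a in arrows if a in ["activates", "activate", "promotes", "enhances"])
--     inhibits_count = sum(1 for a in arrows if a in ["inhibits", "inhibit", "suppresses", "represses"])
--     binds_count = sum(1 for a in arrows if a == "binds")
--
--     # Decision logic
--     if activates_count > 0 and inhibits_count == 0:
--         return "activates"
--     elif inhibits_count > 0 and activates_count == 0: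
--         return "inhibits"
--     elif activates_count > 0 and inhibits_count > 0:
--         return "regulates"
--     elif binds_count > 0:
--         return "binds"
--     else:
--         return "binds"
-- ===== SOURCE B (Python) =====
-- def determine_interaction_arrow(functions):
--     """Single fused pass: track two booleans instead of building the arrows
--     list and scanning it three times."""
--     ACT = ("activates", "activate", "promotes", "enhances")
--     INH = ("inhibits", "inhibit", "suppresses", "represses")
--     has_activate = has_inhibit = False
--     for f in functions:
--         a = f.get("arrow")
--         if not a:
--             continue
--         a = a.lower()
--         if a in ACT:
--             has_activate = True
--         elif a in INH:
--             has_inhibit = True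
--     if has_activate and has_inhibit:
--         return "regulates"
--     if has_activate:
--         return "activates"
--     if has_inhibit:
--         return "inhibits"
--     return "binds"
-- ===== Notes on version B (the rewrite author's own statement) =====
-- stated objective: simpler
-- what changed: A builds the lowercased arrows list and scans it three times (counting activates/inhibits/binds) then branches on counts; B makes one fused pass over functions maintaining two booleans (has_activate, has_inhibit) and branches on them, dropping the intermediate list and the unused binds count.
import Mathlib
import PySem

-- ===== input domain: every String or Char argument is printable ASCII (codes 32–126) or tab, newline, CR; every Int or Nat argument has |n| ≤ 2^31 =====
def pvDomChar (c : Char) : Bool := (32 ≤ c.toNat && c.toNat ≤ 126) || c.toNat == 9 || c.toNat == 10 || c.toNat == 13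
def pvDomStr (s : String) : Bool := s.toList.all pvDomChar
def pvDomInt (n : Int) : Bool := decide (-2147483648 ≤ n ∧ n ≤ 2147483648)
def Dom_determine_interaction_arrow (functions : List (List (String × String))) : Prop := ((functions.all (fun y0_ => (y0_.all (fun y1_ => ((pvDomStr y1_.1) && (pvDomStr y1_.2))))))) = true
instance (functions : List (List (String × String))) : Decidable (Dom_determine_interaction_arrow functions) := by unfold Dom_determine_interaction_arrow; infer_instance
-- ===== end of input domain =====

-- B replaces A's four list passes (build arrows, three counts) by one fused boolean-flag pass; same result, simpler.

-- ===== PORT A =====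
def pvActList : List String := ["activates", "activate", "promotes", "enhances"]
def pvInhList : List String := ["inhibits", "inhibit", "suppresses", "represses"]

-- A: arrows = [f.get("arrow","").lower() for f in functions if f.get("arrow")]
def pvArrowsOf (functions : List (List (String × String))) : List String :=
  functions.filterMap (fun f =>
    match (PySem.Dict.mk f).get? "arrow" with
    | some s => if s ≠ "" then some (PySem.Str.lower s) else none
    | none => none)

def determine_interaction_arrow (functions : List (List (String × String))) : String :=
  if functions = [] then "binds"
  else
    let arrows := pvArrowsOf functions
    if arrows = [] then "binds"
    else
      let activates_count := arrows.countP (fun a => pvActList.contains a)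
      let inhibits_count := arrows.countP (fun a => pvInhList.contains a)
      let binds_count := arrows.countP (fun a => a == "binds")
      if activates_count > 0 ∧ inhibits_count = 0 then "activates"
      else if inhibits_count > 0 ∧ activates_count = 0 then "inhibits"
      else if activates_count > 0 ∧ inhibits_count > 0 then "regulates"
      else if binds_count > 0 then "binds"
      else "binds"

-- ===== PORT B =====
def pvStep (st : Bool × Bool) (f : List (String × String)) : Bool × Bool :=
  match (PySem.Dict.mk f).get? "arrow" with
  | some s =>
    if s ≠ "" then
      let a := PySem.Str.lower s
      if pvActList.contains a then (true, st.2)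
      else if pvInhList.contains a then (st.1, true)
      else st
    else st
  | none => st

def determine_interaction_arrow_alt (functions : List (List (String × String))) : String :=
  let st := functions.foldl pvStep (false, false)
  if st.1 && st.2 then "regulates"
  else if st.1 then "activates"
  else if st.2 then "inhibits"
  else "binds"

-- ===== PRECONDITION & SPEC =====
def Spec_determine_interaction_arrow (functions : List (List (String × String))) (out : String) : Prop := out = determine_interaction_arrow_alt functions
instance (functions : List (List (String × String))) (out : String) : Decidable (Spec_determine_interaction_arrow functions out) := by unfold Spec_determine_interaction_arrow; infer_instance

-- ===== CLAIM (what is proved, stated in full; the proofs are below) =====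
def Claim_equal_determine_interaction_arrow : Prop := ∀ (functions : List (List (String × String))), Dom_determine_interaction_arrow functions → Spec_determine_interaction_arrow functions (determine_interaction_arrow functions)

-- ===== LEMMAS AND PROOFS =====

set_option maxRecDepth 4000

-- the activate and inhibit keyword lists are disjoint
theorem pv_act_not_inh (a : String) (h : a ∈ pvActList) : a ∉ pvInhList := by
  simp only [pvActList, List.mem_cons, List.not_mem_nil, or_false] at h
  rcases h with h | h | h | h <;> subst h <;> decide

-- the fused fold computes exactly the two "any" flags over A's arrows list
theorem pv_fold_eq (functions : List (List (String × String))) (ha hi : Bool) :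
    functions.foldl pvStep (ha, hi) =
      (ha || (pvArrowsOf functions).any (fun a => pvActList.contains a),
       hi || (pvArrowsOf functions).any (fun a => pvInhList.contains a)) := by
  induction functions generalizing ha hi with
  | nil => simp [pvArrowsOf]
  | cons f fs ih =>
    cases hget : (PySem.Dict.mk f).get? "arrow" with
    | none => simp [pvStep, pvArrowsOf, hget, ih, -PySem.Dict.get?]
    | some s =>
      by_cases hs : s = ""
      · simp [pvStep, pvArrowsOf, hget, hs, ih, -PySem.Dict.get?]
      · by_cases hact : PySem.Str.lower s ∈ pvActList
        · simp [pvStep, pvArrowsOf, hget, hs, hact, pv_act_not_inh _ hact, ih, -PySem.Dict.get?]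
        · by_cases hinh : PySem.Str.lower s ∈ pvInhList
          · simp [pvStep, pvArrowsOf, hget, hs, hact, hinh, ih, -PySem.Dict.get?]
          · simp [pvStep, pvArrowsOf, hget, hs, hact, hinh, ih, -PySem.Dict.get?]

-- a positive countP is the same fact as any
theorem pv_count_pos_iff (l : List String) (p : String → Bool) :
    0 < l.countP p ↔ l.any p = true := by
  simp [List.countP_pos_iff, List.any_eq_true]

-- ===== VERDICT (by name: the statement is the Claim_ definition above) =====
theorem determine_interaction_arrow_spec : Claim_equal_determine_interaction_arrow := by
  intro functions _
  show determine_interaction_arrow functions = determine_interaction_arrow_alt functions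
  unfold determine_interaction_arrow determine_interaction_arrow_alt
  rw [pv_fold_eq]
  by_cases hf : functions = []
  · subst hf; simp [pvArrowsOf]
  · simp only [hf, if_neg, not_false_eq_true]
    by_cases he : pvArrowsOf functions = []
    · simp [he]
    · simp only [he, if_neg, not_false_eq_true]
      have eA := pv_count_pos_iff (pvArrowsOf functions) (fun a => pvActList.contains a)
      have eI := pv_count_pos_iff (pvArrowsOf functions) (fun a => pvInhList.contains a)
      cases hA : (pvArrowsOf functions).any (fun a => pvActList.contains a) <;>
        cases hI : (pvArrowsOf functions).any (fun a => pvInhList.contains a) <;>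
          rw [hA] at eA <;> rw [hI] at eI <;>
            simp_all [Nat.pos_iff_ne_zero]
      obtain ⟨x, hxm, hxI⟩ := eI
      obtain ⟨y, hym, hyA⟩ := eA
      rw [if_neg (fun h => h x hxm hxI), if_neg (fun h => h y hym hyA)]
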